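-- pv_equiv track=rewrite | github.com/gpgun0/baekjoon_ | brute_force/solution/1107_리모컨.py | check
-- ===== SOURCE A (Python) =====
-- def check(num, broken):
--     if num == 0:
--         if broken[num]:
--             return False
--
--     while num:
--         if broken[num % 10]:
--             return False
--         num = num // 10
--
--     return True
-- ===== SOURCE B (Python) =====
-- def check(num, broken):
--     return all(not broken[int(c)] for c in str(num))
-- ===== Notes on version B (the rewrite author's own statement) =====
-- stated objective: idiomatic
-- what changed: Replaces the num==0 special case plus least-significant-first mod/div digit peeling with a single generator pass over the characters of str(num), most significant digit first.
-- outside the precondition, e.g. on check(53, [False, False, False, True]): A returns False, B raises IndexError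
import Mathlib
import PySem

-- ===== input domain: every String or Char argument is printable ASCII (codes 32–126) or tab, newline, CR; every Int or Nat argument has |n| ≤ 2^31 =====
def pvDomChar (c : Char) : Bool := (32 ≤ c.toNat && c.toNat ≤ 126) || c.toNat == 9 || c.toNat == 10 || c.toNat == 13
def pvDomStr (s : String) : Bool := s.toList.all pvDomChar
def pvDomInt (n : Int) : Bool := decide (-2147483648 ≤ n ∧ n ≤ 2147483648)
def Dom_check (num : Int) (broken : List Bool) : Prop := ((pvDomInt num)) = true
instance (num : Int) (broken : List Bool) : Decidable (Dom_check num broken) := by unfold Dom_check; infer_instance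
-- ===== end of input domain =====

-- B is the idiomatic rewrite: one pass over the characters of str(num) (most significant digit
-- first) instead of A's num==0 special case plus least-significant-first mod/div digit peeling.


-- ===== PORT A =====
-- the 'while num:' loop of A; Pre_check guarantees 0 ≤ num (Python's loop diverges for negative
-- num), so recursing on num.toNat with Nat's % and / is exact (they agree with Python's % and //
-- on nonnegative arguments)
def checkLoop (broken : List Bool) (n : Nat) : Bool :=
  if h : n = 0 then true
  else if (PySem.List.pyGet? broken ((n % 10 : Nat) : Int)).getD false then false
  else checkLoop broken (n / 10)
decreasing_by exact Nat.div_lt_self (Nat.pos_of_ne_zero h) (by norm_num)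

def check (num : Int) (broken : List Bool) : Bool :=
  if num = 0 then
    if (PySem.List.pyGet? broken num).getD false then false
    else checkLoop broken num.toNat
  else checkLoop broken num.toNat

-- ===== PORT B =====
-- int(c) ported as c.toNat - 48: exact for the digit characters str(num) yields when 0 ≤ num
-- (Pre_check excludes negative num, on which Python B raises ValueError at the '-' character)
def check_alt (num : Int) (broken : List Bool) : Bool :=
  (PySem.Int.toStr num).toList.all
    (fun c => !((PySem.List.pyGet? broken ((c.toNat : Int) - 48)).getD false))

-- ===== PRECONDITION & SPEC =====
-- Pre_check excludes exactly the inputs on which Python A raises or fails to return: negative num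
-- (A's while loop diverges, or returns False early only when a digit of the repeating tail is
-- broken, while B raises ValueError), num = 0 with broken = [] (A raises IndexError), and num
-- with a decimal digit ≥ len(broken) (A raises IndexError, or returns False early when a
-- lower-significance broken digit is hit first, while B raises IndexError).
def Pre_check (num : Int) (broken : List Bool) : Prop :=
  0 ≤ num ∧ (num = 0 → broken ≠ []) ∧ ∀ d ∈ Nat.digits 10 num.toNat, d < broken.length
instance (num : Int) (broken : List Bool) : Decidable (Pre_check num broken) := by
  unfold Pre_check; infer_instance

def pvWitness_check : Int × List Bool :=
  (42, [false, true, false, false, false, false, false, false, false, false])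

def Spec_check (num : Int) (broken : List Bool) (out : Bool) : Prop := out = check_alt num broken
instance (num : Int) (broken : List Bool) (out : Bool) : Decidable (Spec_check num broken out) := by unfold Spec_check; infer_instance

-- ===== CLAIM (what is proved, stated in full; the proofs are below) =====
def Claim_equal_check : Prop := ∀ (num : Int) (broken : List Bool), Dom_check num broken → Pre_check num broken → Spec_check num broken (check num broken)

-- ===== LEMMAS AND PROOFS =====

-- the digit predicate both sides reduce to
def digOK (broken : List Bool) (d : Nat) : Bool :=
  !((PySem.List.pyGet? broken ((d : Nat) : Int)).getD false)

theorem all_congr_mem {α : Type} {l : List α} {p q : α → Bool}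
    (h : ∀ a ∈ l, p a = q a) : l.all p = l.all q := by
  induction l with
  | nil => rfl
  | cons a l ih => simp_all

-- A's loop computes the digit predicate over Nat.digits (order irrelevant for `all`)
theorem checkLoop_eq (broken : List Bool) :
    ∀ n : Nat, checkLoop broken n = (Nat.digits 10 n).all (digOK broken) := by
  intro n
  induction n using Nat.strong_induction_on with
  | _ n ih =>
    rw [checkLoop]
    by_cases h : n = 0
    · simp [h]
    · rw [Nat.digits_def' (by norm_num : (1:ℕ) < 10) (Nat.pos_of_ne_zero h)]
      rw [List.all_cons, ih (n / 10) (Nat.div_lt_self (Nat.pos_of_ne_zero h) (by norm_num))]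
      simp only [h, dite_false, digOK]
      cases hb : (PySem.List.pyGet? broken ((n % 10 : Nat) : Int)).getD false <;> simp

-- Nat.toDigits via Nat.digits, for positive n
theorem toDigitsCore_eq :
    ∀ (fuel n : Nat) (acc : List Char), 0 < n → n ≤ fuel →
      Nat.toDigitsCore 10 fuel n acc = ((Nat.digits 10 n).map Nat.digitChar).reverse ++ acc := by
  intro fuel
  induction fuel with
  | zero => intro n acc hn hle; omega
  | succ fuel ih =>
    intro n acc hn hle
    rw [Nat.toDigitsCore]
    by_cases h : n / 10 = 0
    · have h10 : n < 10 := by omega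
      have : n % 10 = n := Nat.mod_eq_of_lt h10
      rw [Nat.digits_def' (by norm_num : (1:ℕ) < 10) hn, h]
      simp [this]
    · have hlt : n / 10 < n := Nat.div_lt_self hn (by norm_num)
      rw [if_neg h, ih (n / 10) _ (Nat.pos_of_ne_zero h) (by omega)]
      rw [Nat.digits_def' (by norm_num : (1:ℕ) < 10) hn]
      simp

theorem toChars_nonneg (num : Int) (h : 0 ≤ num) :
    PySem.Int.toChars num =
      if num = 0 then ['0'] else ((Nat.digits 10 num.toNat).map Nat.digitChar).reverse := by
  unfold PySem.Int.toChars
  rw [if_neg (by omega)]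
  by_cases h0 : num = 0
  · subst h0; rfl
  · have hpos : 0 < num.toNat := by omega
    rw [if_neg h0]
    unfold Nat.toDigits
    rw [toDigitsCore_eq (num.toNat + 1) num.toNat [] hpos (by omega)]
    simp

theorem digitChar_val (d : Nat) (h : d < 10) : ((Nat.digitChar d).toNat : Int) - 48 = (d : Int) := by
  interval_cases d <;> rfl

-- B also computes the digit predicate over Nat.digits
theorem check_alt_eq (num : Int) (broken : List Bool) (h : 0 ≤ num) :
    check_alt num broken =
      if num = 0 then digOK broken 0 else (Nat.digits 10 num.toNat).all (digOK broken) := by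
  unfold check_alt
  rw [PySem.Int.toList_toStr, toChars_nonneg num h]
  by_cases h0 : num = 0
  · simp only [h0, if_true, List.all_cons, List.all_nil, Bool.and_true]
    simp [digOK, show (('0'.toNat : Int) - 48) = 0 from rfl]
  · rw [if_neg h0, if_neg h0, List.all_reverse, List.all_map]
    refine all_congr_mem ?_
    intro d hd
    have hlt : d < 10 := Nat.digits_lt_base (by norm_num) hd
    simp only [Function.comp, digOK, digitChar_val d hlt]

-- ===== VERDICT (by name: the statement is the Claim_ definition above) =====
theorem check_spec : Claim_equal_check := by
  intro num broken _dom ⟨hnn, _hz, _hd⟩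
  unfold Spec_check check
  rw [check_alt_eq num broken hnn]
  by_cases h0 : num = 0
  · simp only [h0, if_true]
    rw [checkLoop_eq]
    have : (0 : Int).toNat = 0 := rfl
    simp only [this, digOK, Nat.digits_zero, List.all_nil, Nat.cast_zero]
    cases hb : (PySem.List.pyGet? broken 0).getD false <;> simp
  · rw [if_neg h0, if_neg h0, checkLoop_eq]
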